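-- pv_equiv track=rewrite | github.com/DanilaMulyarchik/4-semestr | AOIS/Lab_3/calculation_method.py | change_value
-- ===== SOURCE A (Python) =====
-- def change_value(temp_rez: str, take: bool):
--     rez = str()
--     for i in range(len(temp_rez)):
--         if temp_rez[i] == '!' and temp_rez[i + 1] == '0':
--             rez += '1'
--             take = True
--         elif temp_rez[i] == '!' and temp_rez[i + 1] == '1':
--             rez += '0'
--             take = True
--         elif temp_rez[i] == '1' and not take and temp_rez[i-1] != 'x':
--             rez += '1'
--         elif temp_rez[i] == '0' and not take:
--             rez += '0'
--         elif not take: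
--             rez += temp_rez[i]
--         else:
--             take = False
--     return rez
-- ===== SOURCE B (Python) =====
-- def change_value(temp_rez: str, take: bool):
--     rez = []
--     i = 0
--     n = len(temp_rez)
--     while i < n:
--         c = temp_rez[i]
--         if c == '!':
--             nxt = temp_rez[i + 1]  # IndexError on trailing '!', as in the original
--             if nxt == '0':
--                 rez.append('1')
--                 i += 2
--                 take = False
--             elif nxt == '1':
--                 rez.append('0')
--                 i += 2
--                 take = False
--             else:
--                 if take:
--                     take = False
--                 else:
--                     rez.append('!')
--                 i += 1
--         elif take:
--             take = False
--             i += 1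
--         else:
--             rez.append(c)
--             i += 1
--     return ''.join(rez)
-- ===== Notes on version B (the rewrite author's own statement) =====
-- stated objective: alternative
-- what changed: Replaces A's uniform per-index for-loop, in which a 'take' flag set by a marker must be handed to the next iteration to skip the following bit, by a variable-stride while-style index scan that consumes a '!'+bit marker as one two-character unit (i += 2), so the flag handshake for marker bits disappears.
import Mathlib
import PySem

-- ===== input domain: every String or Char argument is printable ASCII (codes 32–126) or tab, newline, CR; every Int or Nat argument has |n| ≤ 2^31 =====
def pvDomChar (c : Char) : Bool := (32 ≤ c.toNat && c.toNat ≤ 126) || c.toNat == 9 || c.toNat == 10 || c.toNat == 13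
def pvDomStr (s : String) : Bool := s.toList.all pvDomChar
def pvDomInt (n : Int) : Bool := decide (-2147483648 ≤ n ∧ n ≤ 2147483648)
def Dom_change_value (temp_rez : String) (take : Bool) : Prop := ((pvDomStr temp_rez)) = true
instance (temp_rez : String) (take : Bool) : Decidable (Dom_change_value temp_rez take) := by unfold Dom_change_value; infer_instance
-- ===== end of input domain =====

-- B replaces A's per-index scan with a take-flag handshake by a variable-stride
-- index loop consuming each '!'+bit marker as one two-character unit (objective: alternative decomposition).


-- ===== PORT A =====
-- loop body of A, one step per index i (temp_rez[i+1] is out of range only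
-- outside Pre_, where Python raises; the port then lets the marker test fail)
def stepA (cs : List Char) (st : List Char × Bool) (i : Int) : List Char × Bool :=
  let rez := st.1
  let take := st.2
  if PySem.List.pyGet? cs i = some '!' ∧ PySem.List.pyGet? cs (i + 1) = some '0' then
    (rez ++ ['1'], true)
  else if PySem.List.pyGet? cs i = some '!' ∧ PySem.List.pyGet? cs (i + 1) = some '1' then
    (rez ++ ['0'], true)
  else if PySem.List.pyGet? cs i = some '1' ∧ take = false ∧ PySem.List.pyGet? cs (i - 1) ≠ some 'x' then
    (rez ++ ['1'], take)
  else if PySem.List.pyGet? cs i = some '0' ∧ take = false then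
    (rez ++ ['0'], take)
  else if take = false then
    (rez ++ (PySem.List.pyGet? cs i).toList, take)
  else
    (rez, false)

def change_value (temp_rez : String) (take : Bool) : String :=
  let cs := temp_rez.toList
  String.mk ((PySem.List.pyRange 0 (PySem.Str.len temp_rez) 1).foldl (stepA cs) ([], take)).1

-- ===== PORT B =====
-- Source B's while-loop: index i, accumulator rez; a marker is consumed as one
-- two-character unit (stride 2). cs[i+1]? = none is where Source B raises (outside Pre_).
def altGo (cs : List Char) (i : Nat) (take : Bool) (rez : List Char) : List Char :=
  if h : i < cs.length then
    let c := cs[i]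
    if c = '!' then
      match cs[i + 1]? with
      | some '0' => altGo cs (i + 2) false (rez ++ ['1'])
      | some '1' => altGo cs (i + 2) false (rez ++ ['0'])
      | _ => if take then altGo cs (i + 1) false rez else altGo cs (i + 1) take (rez ++ ['!'])
    else if take then altGo cs (i + 1) false rez
    else altGo cs (i + 1) take (rez ++ [c])
  else rez
termination_by cs.length - i

def change_value_alt (temp_rez : String) (take : Bool) : String :=
  String.mk (altGo temp_rez.toList 0 take [])

-- ===== PRECONDITION & SPEC =====
-- Pre_ excludes strings ending in '!': there Python's temp_rez[i+1] raises IndexError (in A and in B).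
def Pre_change_value (temp_rez : String) (take : Bool) : Prop :=
  temp_rez.toList.getLast? ≠ some '!'
instance (temp_rez : String) (take : Bool) : Decidable (Pre_change_value temp_rez take) := by
  unfold Pre_change_value; infer_instance

def pvWitness_change_value : String × Bool := ("!01x10", false)

def Spec_change_value (temp_rez : String) (take : Bool) (out : String) : Prop := out = change_value_alt temp_rez take
instance (temp_rez : String) (take : Bool) (out : String) : Decidable (Spec_change_value temp_rez take out) := by unfold Spec_change_value; infer_instance

-- ===== CLAIM (what is proved, stated in full; the proofs are below) =====
def Claim_equal_change_value : Prop := ∀ (temp_rez : String) (take : Bool), Dom_change_value temp_rez take → Pre_change_value temp_rez take → Spec_change_value temp_rez take (change_value temp_rez take)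

-- ===== LEMMAS AND PROOFS =====

-- The loop invariant: from any index i and flag state, A's remaining fold
-- produces exactly B's remaining scan appended to the accumulator.
theorem go_eq (cs : List Char) (hP : cs.getLast? ≠ some '!') (i : Nat) (take : Bool) (rez : List Char) :
    ((PySem.List.pyRange (i : Int) (cs.length : Int) 1).foldl (stepA cs) (rez, take)).1
      = altGo cs i take rez := by
  rw [altGo]
  by_cases h : i < cs.length
  · rw [dif_pos h, PySem.List.pyRange_one_cons (by exact_mod_cast h)]
    simp only [List.foldl_cons]
    have hi : PySem.List.pyGet? cs (i : Int) = some cs[i] := by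
      simp [List.getElem?_eq_getElem h]
    have hi1 : PySem.List.pyGet? cs ((i : Int) + 1) = cs[i + 1]? := by
      rw [show ((i : Int) + 1) = ((i + 1 : Nat) : Int) from by push_cast; ring]
      simp only [PySem.List.pyGet?_natCast]
    by_cases hc : cs[i] = '!'
    · rcases h1 : cs[i + 1]? with _ | b
      · exfalso
        have hn : i + 1 = cs.length := by
          have := List.getElem?_eq_none_iff.mp h1; omega
        apply hP
        rw [List.getLast?_eq_getElem?, show cs.length - 1 = i from by omega,
          List.getElem?_eq_getElem h, hc]
      · have h2 : i + 1 < cs.length := (List.getElem?_eq_some_iff.mp h1).1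
        have hj : PySem.List.pyGet? cs ((i : Int) + 1) = some b := by rw [hi1, h1]
        by_cases hb0 : b = '0'
        · -- marker '!0': two steps of A = B's stride-2 step
          subst hb0
          rw [show stepA cs (rez, take) i = (rez ++ ['1'], true) from by simp [stepA, hi, hj, hc]]
          rw [PySem.List.pyRange_one_cons (by exact_mod_cast h2)]
          simp only [List.foldl_cons]
          rw [show stepA cs (rez ++ ['1'], true) ((i : Int) + 1) = (rez ++ ['1'], false) from by
            simp [stepA, hj]]
          rw [show ((i : Int) + 1 + 1) = ((i + 2 : Nat) : Int) from by push_cast; ring,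
            go_eq cs hP (i + 2) false (rez ++ ['1'])]
          simp [hc]
        · by_cases hb1 : b = '1'
          · subst hb1
            rw [show stepA cs (rez, take) i = (rez ++ ['0'], true) from by simp [stepA, hi, hj, hc]]
            rw [PySem.List.pyRange_one_cons (by exact_mod_cast h2)]
            simp only [List.foldl_cons]
            rw [show stepA cs (rez ++ ['0'], true) ((i : Int) + 1) = (rez ++ ['0'], false) from by
              simp [stepA, hj]]
            rw [show ((i : Int) + 1 + 1) = ((i + 2 : Nat) : Int) from by push_cast; ring,
              go_eq cs hP (i + 2) false (rez ++ ['0'])]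
            simp [hc]
          · -- '!' followed by a non-bit character
            cases take with
            | true =>
              rw [show stepA cs (rez, true) i = (rez, false) from by
                simp [stepA, hi, hj, hc, hb0, hb1]]
              rw [show ((i : Int) + 1) = ((i + 1 : Nat) : Int) from by push_cast; ring,
                go_eq cs hP (i + 1) false rez]
              simp [hc, hb0, hb1]
            | false =>
              rw [show stepA cs (rez, false) i = (rez ++ ['!'], false) from by
                simp [stepA, hi, hj, hc, hb0, hb1]]
              rw [show ((i : Int) + 1) = ((i + 1 : Nat) : Int) from by push_cast; ring,
                go_eq cs hP (i + 1) false (rez ++ ['!'])]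
              simp [hc, hb0, hb1]
    · -- cs[i] is not '!': A appends the character (or skips when the flag is set)
      cases take with
      | true =>
        rw [show stepA cs (rez, true) i = (rez, false) from by simp [stepA, hi, hc]]
        rw [show ((i : Int) + 1) = ((i + 1 : Nat) : Int) from by push_cast; ring,
          go_eq cs hP (i + 1) false rez]
        simp [hc]
      | false =>
        have hstep : stepA cs (rez, false) i = (rez ++ [cs[i]], false) := by
          by_cases h11 : cs[i] = '1'
          · by_cases hx : PySem.List.pyGet? cs ((i : Int) - 1) = some 'x'
            · simp [stepA, hi, h11, hx]
            · simp [stepA, hi, h11, hx]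
          · by_cases h00 : cs[i] = '0'
            · simp [stepA, hi, h00]
            · simp [stepA, hi, hc, h11, h00]
        rw [hstep]
        rw [show ((i : Int) + 1) = ((i + 1 : Nat) : Int) from by push_cast; ring,
          go_eq cs hP (i + 1) false (rez ++ [cs[i]])]
        simp [hc]
  · rw [dif_neg h, PySem.List.pyRange_one_eq_nil (by exact_mod_cast Nat.le_of_not_lt h)]
    simp
termination_by cs.length - i

-- ===== VERDICT (by name: the statement is the Claim_ definition above) =====
theorem change_value_spec : Claim_equal_change_value := by
  intro temp_rez take _ hpre
  unfold Spec_change_value change_value change_value_alt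
  simp only [PySem.Str.len_eq]
  have h := go_eq temp_rez.toList hpre 0 take []
  simp only [Nat.cast_zero] at h
  rw [h]
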